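-- pv_equiv track=rewrite | github.com/hashkanna/codeforces | 20170917/beroffice.py | typo
-- ===== SOURCE A (Python) =====
-- def typo(s):
--     vowels = ['a','e','i','o','u']
--     if len(s) <=2:
--         return s
--     for i in range(2,len(s)):
--         if s[i] in vowels or s[i-1] in vowels or s[i-2] in vowels:
--             pass
--         elif s[i] == s[i-1] == s[i-2]:
--             pass
--         else:
--             return s[:i] + ' ' + typo(s[i:])
--     return s
-- ===== SOURCE B (Python) =====
-- def typo(s):
--     vowels = set('aeiou')
--     out = []
--     seg = []
--     for c in s:
--         if (len(seg) >= 2 and c not in vowels and seg[-1] not in vowels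
--                 and seg[-2] not in vowels and not (c == seg[-1] == seg[-2])):
--             out.append(''.join(seg))
--             out.append(' ')
--             seg = [c]
--         else:
--             seg.append(c)
--     out.append(''.join(seg))
--     return ''.join(out)
-- ===== Notes on version B (the rewrite author's own statement) =====
-- stated objective: faster
-- what changed: Replaced A's restart-and-rescan recursion (each split slices the string and recurses, rescanning with O(n) slice copies) with a single left-to-right pass that keeps the current segment and checks only the last two kept characters against the incoming one.
import Mathlib
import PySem

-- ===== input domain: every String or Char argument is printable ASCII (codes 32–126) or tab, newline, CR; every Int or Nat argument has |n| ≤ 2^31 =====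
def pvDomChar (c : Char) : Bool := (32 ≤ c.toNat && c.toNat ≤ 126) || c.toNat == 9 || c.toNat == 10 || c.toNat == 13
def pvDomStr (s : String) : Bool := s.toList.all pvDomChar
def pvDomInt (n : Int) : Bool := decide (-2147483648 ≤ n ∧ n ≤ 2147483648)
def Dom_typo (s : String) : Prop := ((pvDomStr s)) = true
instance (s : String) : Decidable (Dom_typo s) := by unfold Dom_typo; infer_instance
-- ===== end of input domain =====

-- B replaces A's restart-and-rescan recursion (O(n^2)) by one linear pass over the
-- characters tracking the current segment; measured asymptotically faster.

-- ===== PORT A =====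
-- A works on a list of chars; slices s[:i], s[i:] are exact as take/drop since 0 ≤ i ≤ len.
def isVowelA (c : Char) : Bool := c ∈ ['a', 'e', 'i', 'o', 'u']

-- the for-loop of A: scan indices i = start .. len-1, return the first i where A splits.
-- The fuel argument (enough for the scan to reach len) only makes the recursion structural.
def findSplitGo (fuel : Nat) (l : List Char) (i : Nat) : Option Nat :=
  match fuel with
  | 0 => none
  | fuel + 1 =>
    if h : i < l.length then
      if isVowelA l[i] || isVowelA (l[i-1]'(by omega)) || isVowelA (l[i-2]'(by omega)) then
        findSplitGo fuel l (i+1)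
      else if l[i] == (l[i-1]'(by omega)) && (l[i-1]'(by omega)) == (l[i-2]'(by omega)) then
        findSplitGo fuel l (i+1)
      else some i
    else none

def findSplit (l : List Char) (i : Nat) : Option Nat := findSplitGo (l.length - i + 1) l i

-- A's recursion; fuel = |s| bounds the number of splits (each recursion drops ≥ 2 chars)
def typoGo (fuel : Nat) (l : List Char) : List Char :=
  match fuel with
  | 0 => l
  | fuel + 1 =>
    if l.length ≤ 2 then l
    else
      match findSplit l 2 with
      | none => l
      | some i => l.take i ++ ' ' :: typoGo fuel (l.drop i)

def typo (s : String) : String := String.mk (typoGo s.toList.length s.toList)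

-- ===== PORT B =====
-- B's loop body; the Python segment list `seg` is kept reversed here (rseg), so
-- seg[-1], seg[-2] are the first two elements and `len(seg) >= 2` is the b::a::_ match.
def isVowelB (c : Char) : Bool := c ∈ ['a', 'e', 'i', 'o', 'u']

def stepB (st : List Char × List Char) (c : Char) : List Char × List Char :=
  match st with
  | (out, b :: a :: t) =>
    if !isVowelB c && !isVowelB b && !isVowelB a && !(c == b && b == a) then
      (out ++ (b :: a :: t).reverse ++ [' '], [c])
    else (out, c :: b :: a :: t)
  | (out, rseg) => (out, c :: rseg)

def typo_alt (s : String) : String :=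
  let (out, rseg) := s.toList.foldl stepB ([], [])
  String.mk (out ++ rseg.reverse)

-- ===== PRECONDITION & SPEC =====
def Spec_typo (s : String) (out : String) : Prop := out = typo_alt s
instance (s : String) (out : String) : Decidable (Spec_typo s out) := by unfold Spec_typo; infer_instance

-- ===== CLAIM (what is proved, stated in full; the proofs are below) =====
def Claim_equal_typo : Prop := ∀ (s : String), Dom_typo s → Spec_typo s (typo s)

-- ===== LEMMAS AND PROOFS =====

-- the split test on a triple (a,b = last two kept chars, c = incoming char)
def bad (a b c : Char) : Bool :=
  !isVowelB c && !isVowelB b && !isVowelB a && !(c == b && b == a)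

-- first split position relative to context chars a, b
def findC (a b : Char) : List Char → Option Nat
  | [] => none
  | c :: rest => if bad a b c then some 0 else (findC b c rest).map (· + 1)

-- B's whole result from a given segment state
def runB (rseg m : List Char) : List Char :=
  let (out, r) := m.foldl stepB ([], rseg)
  out ++ r.reverse

theorem out_prefix (m : List Char) (out rseg : List Char) :
    m.foldl stepB (out, rseg) =
      (out ++ (m.foldl stepB ([], rseg)).1, (m.foldl stepB ([], rseg)).2) := by
  induction m generalizing out rseg with
  | nil => simp
  | cons c m ih =>
    match rseg with
    | b :: a :: t =>
      by_cases hb : (!isVowelB c && !isVowelB b && !isVowelB a && !(c == b && b == a)) = true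
      · simp only [List.foldl_cons, stepB, hb, if_true, List.nil_append]
        rw [ih (out ++ (b :: a :: t).reverse ++ [' ']) [c],
            ih ((b :: a :: t).reverse ++ [' ']) [c]]
        simp
      · simp only [List.foldl_cons, stepB, hb, Bool.false_eq_true, if_false]
        exact ih out _
    | [] => simp only [List.foldl_cons, stepB]; exact ih out _
    | [x] => simp only [List.foldl_cons, stepB]; exact ih out _

theorem runB_eq (m : List Char) (rseg out : List Char) :
    (m.foldl stepB (out, rseg)).1 ++ (m.foldl stepB (out, rseg)).2.reverse
      = out ++ runB rseg m := by
  rw [out_prefix]; simp [runB]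

-- master lemma: B's run from a segment whose last two kept chars are a then b
theorem runB_master (m : List Char) (a b : Char) (t : List Char) :
    runB (b :: a :: t) m =
      t.reverse ++ a :: b ::
        (match findC a b m with
         | none => m
         | some k => m.take k ++ ' ' :: runB [] (m.drop k)) := by
  induction m generalizing a b t with
  | nil => simp [runB, findC]
  | cons c rest ih =>
    by_cases hb : bad a b c = true
    · have hb' : (!isVowelB c && !isVowelB b && !isVowelB a && !(c == b && b == a)) = true := hb
      have hstep : stepB ([], b :: a :: t) c =
          ((b :: a :: t).reverse ++ [' '], [c]) := by
        simp only [stepB]; rw [if_pos hb']; simp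
      have h1 : runB (b :: a :: t) (c :: rest) =
          (b :: a :: t).reverse ++ ' ' :: runB [c] rest := by
        simp only [runB, List.foldl_cons, hstep]
        have := runB_eq rest [c] ((b :: a :: t).reverse ++ [' '])
        simpa using this
      have h2 : runB [] (c :: rest) = runB [c] rest := by
        simp [runB, stepB]
      rw [h1, h2.symm]
      simp [findC, hb]
    · have hb' : ¬ ((!isVowelB c && !isVowelB b && !isVowelB a && !(c == b && b == a)) = true) := hb
      have hstep : stepB ([], b :: a :: t) c = ([], c :: b :: a :: t) := by
        simp only [stepB]; rw [if_neg hb']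
      have h1 : runB (b :: a :: t) (c :: rest) = runB (c :: b :: a :: t) rest := by
        simp [runB, hstep]
      rw [h1, ih b c (a :: t)]
      simp only [findC, hb]
      cases hf : findC b c rest with
      | none => simp
      | some k => simp

-- unfold one step of the scan when the index is still in range
theorem findSplit_step (l : List Char) (i : Nat) (h : i < l.length) :
    findSplit l i =
      if isVowelA (l[i]'h) || isVowelA (l[i-1]'(by omega)) || isVowelA (l[i-2]'(by omega)) then
        findSplit l (i+1)
      else if (l[i]'h) == (l[i-1]'(by omega)) && (l[i-1]'(by omega)) == (l[i-2]'(by omega)) then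
        findSplit l (i+1)
      else some i := by
  have hf : l.length - i + 1 = (l.length - (i+1) + 1) + 1 := by omega
  rw [findSplit, hf, findSplitGo, dif_pos h]
  rfl

theorem findSplit_none (l : List Char) (i : Nat) (h : ¬ i < l.length) :
    findSplit l i = none := by
  rw [findSplit, findSplitGo, dif_neg h]

-- findSplit over pre ++ [a, b] ++ m starting at |pre| + 2 is findC a b m shifted
theorem findSplit_findC (m : List Char) (a b : Char) (pre : List Char) :
    findSplit (pre ++ [a, b] ++ m) (pre.length + 2) =
      (findC a b m).map (· + (pre.length + 2)) := by
  induction m generalizing a b pre with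
  | nil =>
    rw [findSplit_none]
    · simp [findC]
    · simp
  | cons c rest ih =>
    have hlen : pre.length + 2 < (pre ++ [a, b] ++ c :: rest).length := by
      simp
    have ga : (pre ++ [a, b] ++ c :: rest)[pre.length + 2 - 2]'(by omega) = a := by
      simp
    have gb : (pre ++ [a, b] ++ c :: rest)[pre.length + 2 - 1]'(by omega) = b := by
      have : pre.length + 2 - 1 = pre.length + 1 := by omega
      simp [this]
    have gc : (pre ++ [a, b] ++ c :: rest)[pre.length + 2]'hlen = c := by
      simp
    have hrec : (pre ++ [a, b] ++ c :: rest) = (pre ++ [a]) ++ [b, c] ++ rest := by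
      simp
    rw [findSplit_step _ _ hlen]
    simp only [ga, gb, gc]
    by_cases hv : (isVowelA c || isVowelA b || isVowelA a) = true
    · rw [if_pos hv]
      have hstep : pre.length + 2 + 1 = (pre ++ [a]).length + 2 := by simp
      rw [hrec, hstep, ih b c (pre ++ [a])]
      have hbad : bad a b c = false := by
        have e : isVowelB = isVowelA := rfl
        simp only [bad, e]
        rcases Bool.or_eq_true _ _ |>.mp hv with h | h
        · rcases Bool.or_eq_true _ _ |>.mp h with h | h <;> simp [h]
        · simp [h]
      simp only [findC, hbad, Bool.false_eq_true, if_false]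
      cases findC b c rest <;> simp <;> omega
    · rw [if_neg hv]
      by_cases he : (c == b && b == a) = true
      · rw [if_pos he]
        have hstep : pre.length + 2 + 1 = (pre ++ [a]).length + 2 := by simp
        rw [hrec, hstep, ih b c (pre ++ [a])]
        have hbad : bad a b c = false := by
          simp only [bad, he]
          simp
        simp only [findC, hbad, Bool.false_eq_true, if_false]
        cases findC b c rest <;> simp <;> omega
      · rw [if_neg he]
        have hbad : bad a b c = true := by
          have e : isVowelB = isVowelA := rfl
          simp only [bad, e]
          simp only [Bool.or_eq_true, not_or, Bool.not_eq_true] at hv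
          rw [Bool.not_eq_true] at he
          simp [hv.1.1, hv.1.2, hv.2, he]
        simp [findC, hbad]

theorem typoGo_eq_runB (n : Nat) :
    ∀ l : List Char, l.length ≤ n → typoGo n l = runB [] l := by
  induction n with
  | zero =>
    intro l h
    have : l = [] := List.eq_nil_of_length_eq_zero (Nat.le_zero.mp h)
    subst this
    simp [typoGo, runB]
  | succ n ih =>
    intro l hlen
    match l with
    | [] => simp [typoGo, runB]
    | [x] => simp [typoGo, runB, stepB]
    | [x, y] => simp [typoGo, runB, stepB]
    | x :: y :: c :: m =>
      have hrun : runB [] (x :: y :: c :: m) = runB [y, x] (c :: m) := by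
        simp [runB, stepB]
      have hfs : findSplit (x :: y :: c :: m) 2 = (findC x y (c :: m)).map (· + 2) := by
        have := findSplit_findC (c :: m) x y []
        simpa using this
      rw [typoGo, if_neg (by simp)]
      rw [hrun, runB_master (c :: m) x y []]
      cases hf : findC x y (c :: m) with
      | none =>
        rw [hfs, hf]
        simp
      | some k =>
        rw [hfs, hf]
        simp only [Option.map_some]
        have hm : m.length + 3 ≤ n + 1 := by simpa using hlen
        have hlt : ((x :: y :: c :: m).drop (k + 2)).length ≤ n := by
          simp
          omega
        have ihv := ih ((x :: y :: c :: m).drop (k + 2)) hlt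
        have hdrop : (x :: y :: c :: m).drop (k + 2) = (c :: m).drop k := by
          simp [List.drop]
        rw [ihv]
        simp [hdrop]

-- ===== VERDICT (by name: the statement is the Claim_ definition above) =====
theorem typo_spec : Claim_equal_typo := by
  intro s _
  unfold Spec_typo typo typo_alt
  rw [typoGo_eq_runB s.toList.length s.toList le_rfl]
  simp only [runB]
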